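-- pv_equiv track=rewrite | github.com/R00tD00m/my_coding_experiments | search_files_alt.py | next_alpha_sequence
-- ===== SOURCE A (Python) =====
-- def next_alpha_sequence(s):
--     if not s:
--         return 'A'
--     s = list(s)
--     i = len(s) - 1
--     while i >= 0:
--         if s[i] != 'Z':
--             s[i] = chr(ord(s[i]) + 1)
--             break
--         else:
--             s[i] = 'A'
--             i -= 1
--     if i < 0:
--         s.insert(0, 'A')
--     return ''.join(s)
-- ===== SOURCE B (Python) =====
-- def next_alpha_sequence(s):
--     if not s:
--         return 'A'
--     if s[-1] != 'Z':
--         return s[:-1] + chr(ord(s[-1]) + 1)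
--     return next_alpha_sequence(s[:-1]) + 'A'
-- ===== Notes on version B (the rewrite author's own statement) =====
-- stated objective: simpler
-- what changed: Replaces the index-based while loop over a mutable char list (with a broke-flag and front insertion) by a three-line recursion on the last character, where the empty-string base case supplies the carry naturally.
import Mathlib
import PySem

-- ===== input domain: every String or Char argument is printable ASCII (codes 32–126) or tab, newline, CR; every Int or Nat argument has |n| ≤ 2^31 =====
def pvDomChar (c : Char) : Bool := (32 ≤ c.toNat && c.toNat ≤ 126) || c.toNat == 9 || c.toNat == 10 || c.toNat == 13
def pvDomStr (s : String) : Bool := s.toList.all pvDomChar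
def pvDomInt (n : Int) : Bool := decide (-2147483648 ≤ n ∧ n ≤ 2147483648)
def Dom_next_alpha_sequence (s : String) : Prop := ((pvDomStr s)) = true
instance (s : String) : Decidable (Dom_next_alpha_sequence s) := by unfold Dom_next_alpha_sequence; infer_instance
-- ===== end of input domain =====

-- B replaces A's index-based while loop over a mutable char list by a short
-- recursion on the last character (objective: simpler). Total; no Pre_ needed.

-- ===== PORT A =====
-- the while loop: python index i = n-1 is represented by the Nat n; n = 0 means i < 0
-- (loop exited without break). Returns the updated list and whether the loop broke.
def nasLoop (s : List Char) : Nat → List Char × Bool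
  | 0 => (s, false)
  | n + 1 =>
      let c := s.getD n ' '
      if c ≠ 'Z' then (s.set n (Char.ofNat (c.toNat + 1)), true)
      else nasLoop (s.set n 'A') n

def next_alpha_sequence (s : String) : String :=
  if s.toList.isEmpty then "A"
  else
    let l := s.toList
    match nasLoop l l.length with
    | (l', true) => String.ofList l'
    | (l', false) => String.ofList ('A' :: l')   -- i < 0: s.insert(0, 'A')

-- ===== PORT B =====
-- B recurses on the last character (python s[-1], s[:-1]); in Lean the recursion
-- runs over the reversed character list so that the last character is in head position.
def nasAltRev : List Char → List Char
  | [] => ['A']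
  | c :: rest =>
      if c ≠ 'Z' then Char.ofNat (c.toNat + 1) :: rest
      else 'A' :: nasAltRev rest

def next_alpha_sequence_alt (s : String) : String :=
  String.ofList (nasAltRev s.toList.reverse).reverse

-- ===== PRECONDITION & SPEC =====
def Spec_next_alpha_sequence (s : String) (out : String) : Prop := out = next_alpha_sequence_alt s
instance (s : String) (out : String) : Decidable (Spec_next_alpha_sequence s out) := by unfold Spec_next_alpha_sequence; infer_instance

-- ===== CLAIM =====
def Claim_equal_next_alpha_sequence : Prop := ∀ (s : String), Dom_next_alpha_sequence s → Spec_next_alpha_sequence s (next_alpha_sequence s)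

-- ===== LEMMAS AND PROOFS =====
lemma getD_mid (l suf : List Char) (c : Char) :
    (l ++ c :: suf).getD l.length ' ' = c := by
  simp [List.getD_eq_getElem?_getD]

lemma set_mid (l suf : List Char) (c x : Char) :
    (l ++ c :: suf).set l.length x = l ++ x :: suf := by
  induction l with
  | nil => simp
  | cons a l ih => simp [ih]

-- Main invariant: running A's loop on q.reverse ++ suf starting at the end of
-- q.reverse (and prepending 'A' if it never broke) equals B's recursion on q.
lemma nasLoop_eq_altRev (q suf : List Char) :
    (match nasLoop (q.reverse ++ suf) q.reverse.length with
     | (l', true) => l'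
     | (l', false) => 'A' :: l') = (nasAltRev q).reverse ++ suf := by
  induction q generalizing suf with
  | nil => simp [nasLoop, nasAltRev]
  | cons c q' ih =>
      have e1 : (c :: q').reverse ++ suf = q'.reverse ++ c :: suf := by simp
      have e2 : (c :: q').reverse.length = q'.reverse.length + 1 := by simp
      rw [e1, e2]
      by_cases hc : c = 'Z'
      · subst hc
        simp only [nasLoop, getD_mid, set_mid, ne_eq, not_true_eq_false, if_false]
        rw [ih ('A' :: suf)]
        simp [nasAltRev]
      · simp [nasLoop, hc, nasAltRev]

-- ===== VERDICT =====
theorem next_alpha_sequence_spec : Claim_equal_next_alpha_sequence := by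
  intro s _
  unfold Spec_next_alpha_sequence next_alpha_sequence next_alpha_sequence_alt
  by_cases h : s.toList = []
  · simp [h, nasAltRev]
  · simp only [List.isEmpty_iff, h, if_false]
    have key := nasLoop_eq_altRev s.toList.reverse []
    simp only [List.reverse_reverse, List.append_nil] at key
    rcases hm : nasLoop s.toList s.toList.length with ⟨l', b⟩
    rw [hm] at key
    cases b <;> simp_all
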